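-- pv_equiv track=rewrite | github.com/Axj-b/cmake-ctl | cmake-ctl/src/cmake-ctl/project_tracker.py | _is_configure_like
-- ===== SOURCE A (Python) =====
-- def _is_configure_like(argv: list[str]) -> bool:
--     # Track configure/generate style invocations that define project context.
--     if not argv:
--         return True
--     # Explicit non-configure modes.
--     if "--build" in argv or "--install" in argv or "--open" in argv:
--         return False
--     # Explicit configure flags.
--     if ("-S" in argv) or ("-B" in argv) or ("--preset" in argv):
--         return True
--     # Positional source/build path: cmake . or cmake /path/to/src
--     positional = [a for a in argv if not a.startswith("-")]
--     return len(positional) > 0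
-- ===== SOURCE B (Python) =====
-- def _is_configure_like(argv: list[str]) -> bool:
--     if not argv:
--         return True
--     has_mode = has_flag = has_positional = False
--     for arg in argv:
--         if arg in ("--build", "--install", "--open"):
--             has_mode = True
--         elif arg in ("-S", "-B", "--preset"):
--             has_flag = True
--         elif not arg.startswith("-"):
--             has_positional = True
--     if has_mode:
--         return False
--     if has_flag:
--         return True
--     return has_positional
-- ===== Notes on version B (the rewrite author's own statement) =====
-- stated objective: simpler
-- what changed: Replaces A's six separate membership scans plus a filter comprehension with a single pass over argv maintaining three booleans (mode/flag/positional), then decides with the same precedence.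
import Mathlib
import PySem

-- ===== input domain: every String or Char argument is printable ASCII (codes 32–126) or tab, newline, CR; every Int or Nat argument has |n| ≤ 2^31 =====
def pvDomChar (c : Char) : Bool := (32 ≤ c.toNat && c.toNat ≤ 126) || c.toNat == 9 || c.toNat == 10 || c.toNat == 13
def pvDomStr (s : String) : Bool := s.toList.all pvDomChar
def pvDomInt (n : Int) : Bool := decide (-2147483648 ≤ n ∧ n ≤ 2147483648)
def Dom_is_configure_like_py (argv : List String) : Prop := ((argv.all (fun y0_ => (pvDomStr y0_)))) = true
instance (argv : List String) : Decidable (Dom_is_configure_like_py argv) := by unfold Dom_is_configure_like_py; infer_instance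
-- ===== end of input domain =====

-- B replaces A's six membership scans plus a filter comprehension with one pass keeping three booleans (simpler, same precedence).

-- ===== PORT A =====
def is_configure_like_py (argv : List String) : Bool :=
  if argv = [] then true
  else if argv.contains "--build" || argv.contains "--install" || argv.contains "--open" then false
  else if argv.contains "-S" || argv.contains "-B" || argv.contains "--preset" then true
  else decide ((argv.filter (fun a => !(PySem.Str.startswith a "-"))).length > 0)

-- ===== PORT B =====
def pvStepB (s : Bool × Bool × Bool) (arg : String) : Bool × Bool × Bool :=
  if arg = "--build" ∨ arg = "--install" ∨ arg = "--open" then (true, s.2.1, s.2.2)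
  else if arg = "-S" ∨ arg = "-B" ∨ arg = "--preset" then (s.1, true, s.2.2)
  else if !(PySem.Str.startswith arg "-") then (s.1, s.2.1, true)
  else s

def is_configure_like_py_alt (argv : List String) : Bool :=
  if argv = [] then true
  else
    let st := argv.foldl pvStepB (false, false, false)
    if st.1 then false
    else if st.2.1 then true
    else st.2.2

-- ===== PRECONDITION & SPEC =====
def Spec_is_configure_like_py (argv : List String) (out : Bool) : Prop := out = is_configure_like_py_alt argv
instance (argv : List String) (out : Bool) : Decidable (Spec_is_configure_like_py argv out) := by unfold Spec_is_configure_like_py; infer_instance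

-- ===== CLAIM (what is proved, stated in full; the proofs are below) =====
def Claim_equal_is_configure_like_py : Prop := ∀ (argv : List String), Dom_is_configure_like_py argv → Spec_is_configure_like_py argv (is_configure_like_py argv)

-- ===== LEMMAS AND PROOFS =====

def pvIsMode (a : String) : Bool := a == "--build" || a == "--install" || a == "--open"
def pvIsFlag (a : String) : Bool := a == "-S" || a == "-B" || a == "--preset"
def pvIsPos (a : String) : Bool := !(PySem.Str.startswith a "-")

lemma pvStepB_eq (s : Bool × Bool × Bool) (a : String) :
    pvStepB s a = (s.1 || pvIsMode a, s.2.1 || (!pvIsMode a && pvIsFlag a),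
                   s.2.2 || (!pvIsMode a && !pvIsFlag a && pvIsPos a)) := by
  simp only [pvStepB, pvIsMode, pvIsFlag, pvIsPos]
  split_ifs with h1 h2 h3 <;>
    simp_all [Prod.ext_iff, beq_iff_eq] <;> tauto

lemma pvAnyCongrMem {α : Type} (l : List α) (p q : α → Bool)
    (h : ∀ a ∈ l, p a = q a) : l.any p = l.any q := by
  induction l with
  | nil => simp
  | cons a t ih => simp_all

lemma pvAnyOr3 {α : Type} (l : List α) (p q r : α → Bool) :
    l.any (fun a => p a || q a || r a) = (l.any p || l.any q || l.any r) := by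
  induction l with
  | nil => simp
  | cons a t ih =>
    simp only [List.any_cons, ih]
    cases p a <;> cases q a <;> cases r a <;> simp

lemma foldl_pvStepB (argv : List String) (s : Bool × Bool × Bool) :
    argv.foldl pvStepB s =
      (s.1 || argv.any pvIsMode,
       s.2.1 || argv.any (fun a => !pvIsMode a && pvIsFlag a),
       s.2.2 || argv.any (fun a => !pvIsMode a && !pvIsFlag a && pvIsPos a)) := by
  induction argv generalizing s with
  | nil => simp
  | cons a t ih =>
    simp only [List.foldl_cons, List.any_cons, pvStepB_eq, ih]
    refine Prod.ext ?_ (Prod.ext ?_ ?_) <;> simp [Bool.or_assoc]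

theorem is_configure_like_py_spec_aux (argv : List String) :
    is_configure_like_py argv = is_configure_like_py_alt argv := by
  unfold is_configure_like_py is_configure_like_py_alt
  by_cases hnil : argv = []
  · simp [hnil]
  · simp only [if_neg hnil, foldl_pvStepB, Bool.false_or]
    have hmode : (argv.contains "--build" || argv.contains "--install" || argv.contains "--open")
        = argv.any pvIsMode := by
      have : argv.any pvIsMode
          = (argv.any (· == "--build") || argv.any (· == "--install") || argv.any (· == "--open")) := by
        rw [← pvAnyOr3]; rfl
      simp [this, List.any_beq']
    have hflag : (argv.contains "-S" || argv.contains "-B" || argv.contains "--preset")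
        = argv.any pvIsFlag := by
      have : argv.any pvIsFlag
          = (argv.any (· == "-S") || argv.any (· == "-B") || argv.any (· == "--preset")) := by
        rw [← pvAnyOr3]; rfl
      simp [this, List.any_beq']
    rw [hmode, hflag]
    by_cases hm : argv.any pvIsMode = true
    · simp [hm]
    · have hm' : argv.any pvIsMode = false := by simpa using hm
      have hmall : ∀ a ∈ argv, pvIsMode a = false := by
        simpa [List.any_eq_false] using hm'
      have e2 : argv.any (fun a => !pvIsMode a && pvIsFlag a) = argv.any pvIsFlag :=
        pvAnyCongrMem _ _ _ (fun a ha => by simp [hmall a ha])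
      by_cases hf : argv.any pvIsFlag = true
      · simp [hm', e2, hf]
      · have hf' : argv.any pvIsFlag = false := by simpa using hf
        have hfall : ∀ a ∈ argv, pvIsFlag a = false := by
          simpa [List.any_eq_false] using hf'
        have e3 : argv.any (fun a => !pvIsMode a && !pvIsFlag a && pvIsPos a)
            = argv.any pvIsPos :=
          pvAnyCongrMem _ _ _ (fun a ha => by simp [hmall a ha, hfall a ha])
        simp only [hm', hf', e2, e3, Bool.false_eq_true, if_false]
        rw [Bool.eq_iff_iff]
        simp [pvIsPos, List.length_pos_iff, List.filter_eq_nil_iff, List.any_eq_true]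

-- ===== VERDICT (by name: the statement is the Claim_ definition above) =====
theorem is_configure_like_py_spec : Claim_equal_is_configure_like_py := by
  intro argv _
  unfold Spec_is_configure_like_py
  exact is_configure_like_py_spec_aux argv
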